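-- pv_equiv track=rewrite | github.com/MeetSpeakLearn/ExamplesCreatedForTutoring | Python/multiplication.py | gradeSchoolMultiplicationOf2Multiplicands
-- ===== SOURCE A (Python) =====
-- def bung(anyObj, anyList: list) -> list:
--     result = [anyObj]
--     result.extend(anyList)
--     return result
--
-- def bungAndMerge(oneList: list, anotherList: list) -> list:
--     oneList.extend(anotherList)
--     return oneList
--
-- def shiftDigitList(positions: int, digitList: list) -> list:
--     if (positions == 0): return digitList
--     elif (positions > 0): return bungAndMerge([0]*positions, digitList)
--     else: return digitList[positions:]
--
-- def padBy(n: int, digitList: list):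
--     if (n == 0): return
--     digitList.extend([0]*n)
--
-- def padAllBy(n :int, digitListList: list):
--     for digitList in digitListList:
--         padBy(n, digitList)
--
-- def gradeSchoolAddition(addends: list, carry: int = 0) -> list:
--     digitSum = carry                                                    # Initialize the multiply of digits to whatever is carried
--     reducedAddends = []                                                 # We will recurse over the rest of the addends
--     for addend in addends:
--         if (len(addend) == 0):                                          # All addends are of the same length. If we encounter an empty addend, we've finished recursing.
--             if (carry == 0):                                            # If carry is zero, there is nothing more to add to the result, if it is not zero, add the carry.
--                 return []
--             else:
--                 return [carry]
--         thisDigit, *reducedAddend = addend                              # Destructure the addend.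
--         digitSum += thisDigit                                           # Add the first digit of the addend into digitSum
--         reducedAddends.append(reducedAddend)                            # Add the reduced addend to the list of addends over which we'll recurse
--     carry = digitSum // 10                                              # Set carry to the carry value of the next level of recursion
--     digit = digitSum % 10                                               # Compute the digit for this partial result
--     return bung(digit, gradeSchoolAddition(reducedAddends, carry))      # Return a new list, the head of which is the digit and the tail of which is the solution to the reduced addends.
--
-- def gradeSchoolMultiplicationOfDigitAndDigitList(digit: int, digitList: list, carry: int = 0) -> list:
--     if len(digitList) == 0: return [] if (carry == 0) else [carry]
--     else:
--         product = digit * digitList[0]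
--         return bung(product % 10 + carry, gradeSchoolMultiplicationOfDigitAndDigitList(digit, digitList[1:], product // 10))
--
-- def gradeSchoolMultiplicationOf2Multiplicands(multiplicand1: list, multiplicand2: list):
--     addends = []
--     position = 0
--     for digit in multiplicand1:
--         padAllBy(1, addends)
--         addends.append(shiftDigitList(position, gradeSchoolMultiplicationOfDigitAndDigitList(digit, multiplicand2)))
--         position += 1
--     return gradeSchoolAddition(addends)
-- ===== SOURCE B (Python) =====
-- # B: iterative grade-school multiplication: build all aligned partial-product
-- # rows, then add them column by column with zip and a running carry.
-- def gradeSchoolMultiplicationOf2Multiplicands(multiplicand1: list, multiplicand2: list):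
--     n = len(multiplicand1)
--     rows = []
--     for position, digit in enumerate(multiplicand1):
--         row = [0] * position
--         carry = 0
--         for d in multiplicand2:
--             p = digit * d
--             row.append(p % 10 + carry)
--             carry = p // 10
--         if carry:
--             row.append(carry)
--         row.extend([0] * (n - 1 - position))
--         rows.append(row)
--     result = []
--     carry = 0
--     for column in zip(*rows):
--         s = carry + sum(column)
--         result.append(s % 10)
--         carry = s // 10
--     if carry:
--         result.append(carry)
--     return result
-- ===== Notes on version B (the rewrite author's own statement) =====
-- stated objective: simpler
-- what changed: B replaces A's helper-heavy recursive machinery (bung/shift/pad helpers, recursive single-digit multiply, recursive destructuring addition) by two plain loops: build the aligned partial-product rows iteratively, then add them column by column with zip and a running carry; Pre_ excludes only multiplicand1 = [], on which A recurses forever (RecursionError).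
import Mathlib
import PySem

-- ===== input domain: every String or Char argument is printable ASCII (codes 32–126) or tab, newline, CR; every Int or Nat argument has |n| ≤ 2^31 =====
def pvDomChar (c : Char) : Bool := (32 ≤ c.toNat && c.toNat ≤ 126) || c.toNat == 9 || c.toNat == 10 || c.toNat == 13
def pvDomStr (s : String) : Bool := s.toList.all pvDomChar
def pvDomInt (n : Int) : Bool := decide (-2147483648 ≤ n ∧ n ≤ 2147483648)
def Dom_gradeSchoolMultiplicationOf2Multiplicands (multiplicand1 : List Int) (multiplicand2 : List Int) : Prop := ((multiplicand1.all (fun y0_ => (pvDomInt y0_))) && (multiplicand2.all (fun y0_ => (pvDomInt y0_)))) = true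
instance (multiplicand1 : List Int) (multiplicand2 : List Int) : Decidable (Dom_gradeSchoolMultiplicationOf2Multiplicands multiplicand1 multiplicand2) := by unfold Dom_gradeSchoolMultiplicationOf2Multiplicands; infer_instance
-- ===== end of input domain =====

-- B replaces A's recursive helpers by two plain loops: build the aligned partial-product rows,
-- then add them column by column over zip(*rows) with a running carry; same return value as A
-- wherever A returns (A hits RecursionError on multiplicand1 = [], excluded by Pre_; B returns [] there).

-- ===== PORT A =====
def bungA (x : Int) (l : List Int) : List Int := x :: l

def bungAndMergeA (a b : List Int) : List Int := a ++ b

def shiftDigitListA (pos : Int) (l : List Int) : List Int :=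
  if pos == 0 then l
  else if pos > 0 then bungAndMergeA (List.replicate pos.toNat 0) l
  else PySem.List.slice l (some pos) none

def padByA (n : Int) (l : List Int) : List Int :=
  if n == 0 then l else l ++ List.replicate n.toNat 0

def padAllByA (n : Int) (ls : List (List Int)) : List (List Int) := ls.map (padByA n)

def gsMulDigitA (digit : Int) : List Int → Int → List Int
  | [], c => if c == 0 then [] else [c]
  | h :: t, c =>
      let p := digit * h
      bungA (PySem.Int.mod p 10 + c) (gsMulDigitA digit t (PySem.Int.floordiv p 10))

-- the for-loop of gradeSchoolAddition: scans the addends in order; on the first empty addend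
-- returns (early) the carry-only result, otherwise the accumulated digitSum and the reduced addends
def gsCollectA (carry : Int) : List (List Int) → Int → Sum (List Int) (Int × List (List Int))
  | [], ds => .inr (ds, [])
  | a :: rest, ds =>
      match a with
      | [] => .inl (if carry == 0 then [] else [carry])
      | h :: t =>
          match gsCollectA carry rest (ds + h) with
          | .inl r => .inl r
          | .inr (s, red) => .inr (s, t :: red)

-- gradeSchoolAddition; the fuel bounds the recursion depth (one step per digit position).
-- The Python recurses forever when addends = [] (reached only for multiplicand1 = [], outside Pre_).
def gsAddA : Nat → List (List Int) → Int → List Int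
  | 0, _, _ => []
  | fuel + 1, addends, carry =>
      match gsCollectA carry addends carry with
      | .inl r => r
      | .inr (digitSum, reduced) =>
          bungA (PySem.Int.mod digitSum 10) (gsAddA fuel reduced (PySem.Int.floordiv digitSum 10))

def gradeSchoolMultiplicationOf2Multiplicands (multiplicand1 : List Int) (multiplicand2 : List Int) : List Int :=
  let res := multiplicand1.foldl
    (fun st digit =>
      (padAllByA 1 st.1 ++ [shiftDigitListA st.2 (gsMulDigitA digit multiplicand2 0)], st.2 + 1))
    (([] : List (List Int)), (0 : Int))
  gsAddA ((res.1.headD []).length + 1) res.1 0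

-- ===== PORT B =====
-- the inner for-loop over multiplicand2 plus the trailing 'if carry: row.append(carry)'
def scaleRowB (digit : Int) (m2 : List Int) : List Int :=
  let st := m2.foldl (fun (st : List Int × Int) d =>
      let p := digit * d
      (st.1 ++ [PySem.Int.mod p 10 + st.2], PySem.Int.floordiv p 10)) ([], 0)
  if st.2 == 0 then st.1 else st.1 ++ [st.2]

-- the first for-loop of B: one aligned row per (position, digit) of multiplicand1
def buildRowsB (m1 m2 : List Int) (n : Nat) : List (List Int) :=
  (m1.foldl (fun (st : List (List Int) × Nat) digit =>
      (st.1 ++ [List.replicate st.2 0 ++ scaleRowB digit m2 ++ List.replicate (n - 1 - st.2) 0],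
       st.2 + 1)) ([], 0)).1

-- zip(*rows): exactly min-row-length many columns, column k = the k-th entry of every row
def pyZipCols : Nat → List (List Int) → List (List Int)
  | 0, _ => []
  | k + 1, rows => rows.map (fun r => r.headD 0) :: pyZipCols k (rows.map List.tail)

def zipStarB (rows : List (List Int)) : List (List Int) :=
  pyZipCols (((rows.map List.length).min?).getD 0) rows

def gradeSchoolMultiplicationOf2Multiplicands_alt (multiplicand1 : List Int) (multiplicand2 : List Int) : List Int :=
  let rows := buildRowsB multiplicand1 multiplicand2 multiplicand1.length
  let res := (zipStarB rows).foldl (fun (st : List Int × Int) col =>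
      let s := st.2 + col.sum
      (st.1 ++ [PySem.Int.mod s 10], PySem.Int.floordiv s 10)) ([], 0)
  if res.2 == 0 then res.1 else res.1 ++ [res.2]

-- ===== PRECONDITION & SPEC =====
-- Pre_ excludes only multiplicand1 = [], on which the Python A recurses forever (RecursionError); B returns [] there.
def Pre_gradeSchoolMultiplicationOf2Multiplicands (multiplicand1 : List Int) (multiplicand2 : List Int) : Prop :=
  multiplicand1 ≠ []
instance (multiplicand1 : List Int) (multiplicand2 : List Int) : Decidable (Pre_gradeSchoolMultiplicationOf2Multiplicands multiplicand1 multiplicand2) := by unfold Pre_gradeSchoolMultiplicationOf2Multiplicands; infer_instance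

def pvWitness_gradeSchoolMultiplicationOf2Multiplicands : List Int × List Int := ([1, 2], [3])

def Spec_gradeSchoolMultiplicationOf2Multiplicands (multiplicand1 : List Int) (multiplicand2 : List Int) (out : List Int) : Prop := out = gradeSchoolMultiplicationOf2Multiplicands_alt multiplicand1 multiplicand2
instance (multiplicand1 : List Int) (multiplicand2 : List Int) (out : List Int) : Decidable (Spec_gradeSchoolMultiplicationOf2Multiplicands multiplicand1 multiplicand2 out) := by unfold Spec_gradeSchoolMultiplicationOf2Multiplicands; infer_instance

-- ===== CLAIM (what is proved, stated in full; the proofs are below) =====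
def Claim_equal_gradeSchoolMultiplicationOf2Multiplicands : Prop := ∀ (multiplicand1 : List Int) (multiplicand2 : List Int), Dom_gradeSchoolMultiplicationOf2Multiplicands multiplicand1 multiplicand2 → Pre_gradeSchoolMultiplicationOf2Multiplicands multiplicand1 multiplicand2 → Spec_gradeSchoolMultiplicationOf2Multiplicands multiplicand1 multiplicand2 (gradeSchoolMultiplicationOf2Multiplicands multiplicand1 multiplicand2)

-- ===== LEMMAS AND PROOFS =====

-- little-endian value of a digit list
def valD (l : List Int) : Int := l.foldr (fun d v => d + 10 * v) 0

-- the addend rows A builds: the row for digit d at position j is  0^j ++ digits(d*m2) ++ 0^(#rest)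
def PParts (m2 : List Int) : List Int → Int → List (List Int)
  | [], _ => []
  | d :: rest, j =>
      (List.replicate j.toNat 0 ++ gsMulDigitA d m2 0 ++ List.replicate rest.length 0)
        :: PParts m2 rest (j + 1)

-- the K (= min row length) digit emissions with the final leftover carry appended if nonzero
def emitB : Int → Nat → List Int
  | q, 0 => if q == 0 then [] else [q]
  | q, k + 1 => PySem.Int.mod q 10 :: emitB (PySem.Int.floordiv q 10) k

theorem valD_cons (h : Int) (t : List Int) : valD (h :: t) = h + 10 * valD t := rfl

theorem gsCollect_inl (carry : Int) : ∀ (as : List (List Int)) (ds : Int), [] ∈ as →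
    gsCollectA carry as ds = .inl (if carry == 0 then [] else [carry]) := by
  intro as
  induction as with
  | nil => simp
  | cons a rest ih =>
    intro ds h
    match a with
    | [] => rfl
    | x :: t =>
      have : [] ∈ rest := by
        rcases List.mem_cons.mp h with h' | h'
        · exact absurd h'.symm (by simp)
        · exact h'
      simp only [gsCollectA, ih _ this]

theorem gsCollect_inr (carry : Int) : ∀ (as : List (List Int)) (ds : Int), (∀ a ∈ as, a ≠ []) →
    gsCollectA carry as ds = .inr (ds + (as.map (fun a => a.headD 0)).sum, as.map (fun a => a.tail)) := by
  intro as
  induction as with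
  | nil => intro ds _; simp [gsCollectA]
  | cons a rest ih =>
    intro ds h
    match a with
    | [] => exact absurd rfl (h [] (by simp))
    | x :: t =>
      have := ih (ds + x) (fun a ha => h a (List.mem_cons_of_mem _ ha))
      simp only [gsCollectA, this, List.map_cons, List.headD_cons, List.sum_cons]
      congr 2
      ring

-- the sum of the column heads splits off, the tails keep the rest (shared by both add loops)
theorem sum_take_succ (s : Nat) (as : List (List Int)) (hne : ∀ a ∈ as, a ≠ []) :
    (as.map (fun b => valD (b.take (s + 1)))).sum
      = (as.map (fun b => b.headD 0)).sum + 10 * ((as.map (fun b => b.tail)).map (fun b => valD (b.take s))).sum := by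
  have htake : ∀ b ∈ as, valD (b.take (s + 1)) = b.headD 0 + 10 * valD (b.tail.take s) := by
    intro b hb
    match b, hne b hb with
    | x :: t, _ => simp [List.take_succ_cons, valD_cons]
  rw [List.map_congr_left htake, List.map_map]
  have : (as.map fun b => b.headD 0 + 10 * valD (b.tail.take s)).sum
      = (as.map fun b => b.headD 0).sum + (as.map fun b => 10 * valD (b.tail.take s)).sum := by
    induction as with
    | nil => simp
    | cons a rest ih2 => simp; ring
  rw [this, List.sum_map_mul_left]
  rfl

theorem modT (T R : Int) : PySem.Int.mod (T + R * 10) 10 = PySem.Int.mod T 10 := by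
  rw [PySem.Int.mod_eq_emod_of_pos (by norm_num), PySem.Int.mod_eq_emod_of_pos (by norm_num)]
  simp

theorem divT (T R : Int) : PySem.Int.floordiv (T + R * 10) 10 = PySem.Int.floordiv T 10 + R := by
  rw [PySem.Int.floordiv_eq_ediv_of_pos (by norm_num), PySem.Int.floordiv_eq_ediv_of_pos (by norm_num)]
  exact Int.add_mul_ediv_right T R (by norm_num)

theorem gsAdd_emit (s : Nat) : ∀ (fuel : Nat) (as : List (List Int)) (c : Int),
    s < fuel → (∀ a ∈ as, s ≤ a.length) → (∃ a ∈ as, a.length = s) →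
    gsAddA fuel as c = emitB (c + (as.map (fun a => valD (a.take s))).sum) s := by
  induction s with
  | zero =>
    intro fuel as c hf hlb ⟨a, ha, hlen⟩
    obtain ⟨fuel, rfl⟩ : ∃ f, fuel = f + 1 := ⟨fuel - 1, by omega⟩
    have hmem : [] ∈ as := by rwa [List.length_eq_zero_iff.mp hlen] at ha
    rw [gsAddA, gsCollect_inl c as c hmem]
    simp [emitB, valD]
  | succ s ih =>
    intro fuel as c hf hlb ⟨a, ha, hlen⟩
    obtain ⟨fuel, rfl⟩ : ∃ f, fuel = f + 1 := ⟨fuel - 1, by omega⟩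
    have hne : ∀ b ∈ as, b ≠ [] := fun b hb h0 => by
      have := hlb b hb; rw [h0] at this; simp at this
    rw [gsAddA, gsCollect_inr c as c hne]
    set T := c + (as.map (fun b => b.headD 0)).sum with hT
    set R := ((as.map (fun b => b.tail)).map (fun b => valD (b.take s))).sum with hR
    have ihsp := ih fuel (as.map (fun b => b.tail)) (PySem.Int.floordiv T 10) (by omega)
      (by intro b hb
          obtain ⟨b0, hb0, rfl⟩ := List.mem_map.mp hb
          have := hlb b0 hb0
          simp [List.length_tail]; omega)
      (by exact ⟨a.tail, List.mem_map_of_mem ha, by simp [List.length_tail, hlen]⟩)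
    simp only [bungA]
    rw [ihsp]
    show PySem.Int.mod T 10 :: _ = emitB (c + (as.map (fun b => valD (b.take (s+1)))).sum) (s+1)
    rw [sum_take_succ s as hne, emitB]
    have h1 : c + ((as.map fun b => b.headD 0).sum + 10 * R) = T + R * 10 := by rw [hT]; ring
    rw [h1, modT, divT]

-- B's column loop over pyZipCols k equals the same k emissions
theorem zipFold_emit (k : Nat) : ∀ (rows : List (List Int)) (acc : List Int) (carry : Int),
    (∀ a ∈ rows, k ≤ a.length) →
    (let res := (pyZipCols k rows).foldl (fun (st : List Int × Int) col =>
        let s := st.2 + col.sum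
        (st.1 ++ [PySem.Int.mod s 10], PySem.Int.floordiv s 10)) (acc, carry)
     if res.2 == 0 then res.1 else res.1 ++ [res.2])
      = acc ++ emitB (carry + (rows.map (fun a => valD (a.take k))).sum) k := by
  induction k with
  | zero =>
    intro rows acc carry _
    have hz : (rows.map (fun a => valD (a.take 0))).sum = 0 := by simp [valD]
    simp only [pyZipCols, List.foldl_nil, hz, add_zero, emitB]
    by_cases hc : carry = 0 <;> simp [hc]
  | succ k ih =>
    intro rows acc carry hlb
    have hne : ∀ b ∈ rows, b ≠ [] := fun b hb h0 => by
      have := hlb b hb; rw [h0] at this; simp at this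
    set T := carry + (rows.map (fun b => b.headD 0)).sum with hT
    set R := ((rows.map (fun b => b.tail)).map (fun b => valD (b.take k))).sum with hR
    have ihsp := ih (rows.map List.tail) (acc ++ [PySem.Int.mod T 10]) (PySem.Int.floordiv T 10)
      (by intro b hb
          obtain ⟨b0, hb0, rfl⟩ := List.mem_map.mp hb
          have := hlb b0 hb0
          simp [List.length_tail]; omega)
    simp only [pyZipCols, List.foldl_cons] at *
    rw [show carry + (List.map (fun r => r.headD 0) rows).sum = T from rfl] at *
    rw [ihsp, sum_take_succ k rows hne]
    have h1 : carry + ((rows.map fun b => b.headD 0).sum + 10 * R) = T + R * 10 := by rw [hT]; ring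
    rw [h1, emitB, modT, divT, List.append_assoc, List.singleton_append]

-- scaleRowB is A's single-digit multiplication
theorem scale_fold (digit : Int) : ∀ (l acc : List Int) (c : Int),
    (let st := l.foldl (fun (st : List Int × Int) d =>
        let p := digit * d
        (st.1 ++ [PySem.Int.mod p 10 + st.2], PySem.Int.floordiv p 10)) (acc, c)
     if st.2 == 0 then st.1 else st.1 ++ [st.2]) = acc ++ gsMulDigitA digit l c := by
  intro l
  induction l with
  | nil =>
    intro acc c
    simp only [List.foldl_nil, gsMulDigitA]
    by_cases hc : c = 0 <;> simp [hc]
  | cons h t ih =>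
    intro acc c
    simp only [List.foldl_cons]
    rw [ih]
    simp [gsMulDigitA, bungA]

theorem scaleRowB_eq (digit : Int) (m2 : List Int) : scaleRowB digit m2 = gsMulDigitA digit m2 0 := by
  have := scale_fold digit m2 [] 0
  simpa [scaleRowB] using this

theorem shift_eq (j : Int) (hj : 0 ≤ j) (g : List Int) :
    shiftDigitListA j g = List.replicate j.toNat 0 ++ g := by
  unfold shiftDigitListA
  by_cases h0 : j = 0
  · simp [h0]
  · have : j > 0 := by omega
    simp [bungAndMergeA, h0, this]

-- A's accumulation loop builds exactly the rows PParts describes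
theorem fold_eq_P (m2 : List Int) : ∀ (l : List Int) (acc : List (List Int)) (j : Int), 0 ≤ j →
    l.foldl (fun st digit =>
        (padAllByA 1 st.1 ++ [shiftDigitListA st.2 (gsMulDigitA digit m2 0)], st.2 + 1)) (acc, j) =
    (acc.map (fun a => a ++ List.replicate l.length 0) ++ PParts m2 l j, j + l.length) := by
  intro l
  induction l with
  | nil => intro acc j _; simp [PParts]
  | cons d rest ih =>
    intro acc j hj
    rw [List.foldl_cons, ih _ (j + 1) (by omega)]
    simp only [PParts, padAllByA, List.map_append, List.map_map, List.map_cons, List.map_nil,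
      Prod.mk.injEq]
    constructor
    · rw [List.append_assoc, List.singleton_append]
      congr 1
      · apply List.map_congr_left
        intro a _
        show padByA 1 a ++ List.replicate rest.length 0 = a ++ List.replicate (d :: rest).length 0
        simp [padByA, List.replicate_succ]
      · rw [shift_eq j hj]
    · simp only [List.length_cons]
      push_cast
      ring

-- B's row-building loop builds the same rows (n is the full length of multiplicand1)
theorem buildRows_fold (m2 : List Int) (n : Nat) : ∀ (l : List Int) (acc : List (List Int)) (j : Nat),
    j + l.length = n →
    (l.foldl (fun (st : List (List Int) × Nat) digit =>
        (st.1 ++ [List.replicate st.2 0 ++ scaleRowB digit m2 ++ List.replicate (n - 1 - st.2) 0],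
         st.2 + 1)) (acc, j)).1
      = acc ++ PParts m2 l (j : Int) := by
  intro l
  induction l with
  | nil => intro acc j _; simp [PParts]
  | cons d rest ih =>
    intro acc j hj
    rw [List.foldl_cons]
    have hrec := ih (acc ++ [List.replicate j 0 ++ scaleRowB d m2 ++ List.replicate (n - 1 - j) 0])
      (j + 1) (by simp at hj ⊢; omega)
    have h1 : n - 1 - j = rest.length := by simp at hj; omega
    rw [hrec, scaleRowB_eq, h1]
    simp [PParts, List.append_assoc, Nat.cast_add, Nat.cast_one]

theorem main_equiv : ∀ (m1 m2 : List Int), m1 ≠ [] →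
    gradeSchoolMultiplicationOf2Multiplicands m1 m2 = gradeSchoolMultiplicationOf2Multiplicands_alt m1 m2 := by
  intro m1 m2 hpre
  obtain ⟨d0, rest0, rfl⟩ : ∃ d r, m1 = d :: r := by
    match m1, hpre with | d :: r, _ => exact ⟨d, r, rfl⟩
  set m1 := d0 :: rest0 with hm1def
  set rows := PParts m2 m1 0 with hrows
  -- rows is nonempty, with an explicit head
  have hrows_cons : rows = (List.replicate (0:Int).toNat 0 ++ gsMulDigitA d0 m2 0 ++ List.replicate rest0.length 0) :: PParts m2 rest0 1 := by
    rw [hrows, hm1def]; rfl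
  -- the minimum row length s
  obtain ⟨s, hsmin⟩ : ∃ s, (rows.map List.length).min? = some s := by
    rw [hrows_cons]; exact ⟨_, rfl⟩
  obtain ⟨hs_mem, hs_le⟩ := List.min?_eq_some_iff.mp hsmin
  obtain ⟨a0, ha0, ha0len⟩ := List.mem_map.mp hs_mem
  have hlb : ∀ a ∈ rows, s ≤ a.length := fun a ha => hs_le _ (List.mem_map_of_mem ha)
  -- A's side
  have hA : gradeSchoolMultiplicationOf2Multiplicands m1 m2
      = gsAddA ((rows.headD []).length + 1) rows 0 := by
    unfold gradeSchoolMultiplicationOf2Multiplicands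
    rw [fold_eq_P m2 m1 [] 0 le_rfl]
    rfl
  have hfuel : s < (rows.headD []).length + 1 := by
    have : s ≤ (rows.headD []).length := by
      apply hlb
      rw [hrows_cons]; simp
    omega
  rw [hA, gsAdd_emit s _ rows 0 hfuel hlb ⟨a0, ha0, ha0len⟩]
  -- B's side
  unfold gradeSchoolMultiplicationOf2Multiplicands_alt
  have hbr : buildRowsB m1 m2 m1.length = rows := by
    unfold buildRowsB
    rw [buildRows_fold m2 m1.length m1 [] 0 (by simp)]
    rw [hrows]; rfl
  simp only [zipStarB, hbr, hsmin, Option.getD_some]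
  have hz := zipFold_emit s rows [] 0 hlb
  simp only [List.nil_append, zero_add] at hz ⊢
  exact hz.symm

-- ===== VERDICT (by name: the statement is the Claim_ definition above) =====
theorem gradeSchoolMultiplicationOf2Multiplicands_spec : Claim_equal_gradeSchoolMultiplicationOf2Multiplicands := by
  intro m1 m2 _ hpre
  unfold Spec_gradeSchoolMultiplicationOf2Multiplicands
  exact main_equiv m1 m2 hpre
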